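-- pv_equiv track=rewrite | github.com/tomytp/icpc-lib | latex/getlatex.py | inject_custom_type_markup
-- ===== SOURCE A (Python) =====
-- CUSTOM_TYPES = {
--     "ll", "ull", "ld", "i64", "u64",
--     "p64", "pii", "pll", "v64", "vll"
-- }
--
-- def is_ident_char(c: str) -> bool:
--     return c == '_' or c.isalnum()
--
-- def inject_custom_type_markup(s: str) -> str:
--     out = []
--     i, n = 0, len(s)
--     while i < n:
--         if is_ident_char(s[i]):
--             j = i
--             while j < n and is_ident_char(s[j]):
--                 j += 1
--             tok = s[i:j]
--             if tok in CUSTOM_TYPES: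
--                 out.append("@\\typ{" + tok + "}@")
--             else:
--                 out.append(tok)
--             i = j
--         else:
--             out.append(s[i])
--             i += 1
--     return ''.join(out)
-- ===== SOURCE B (Python) =====
-- CUSTOM_TYPES = {
--     "ll", "ull", "ld", "i64", "u64",
--     "p64", "pii", "pll", "v64", "vll"
-- }
--
-- def is_ident_char(c: str) -> bool:
--     return c == '_' or c.isalnum()
--
-- def _render(key, run):
--     seg = ''.join(run)
--     if key and seg in CUSTOM_TYPES:
--         return "@\\typ{" + seg + "}@"
--     return seg
--
-- def inject_custom_type_markup(s: str) -> str: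
--     # single pass, groupby-style: split s into maximal runs of same is_ident_char
--     pieces = []
--     key = None
--     run = []
--     for c in s:
--         k = is_ident_char(c)
--         if k == key:
--             run.append(c)
--         else:
--             if run:
--                 pieces.append(_render(key, run))
--             key, run = k, [c]
--     if run:
--         pieces.append(_render(key, run))
--     return ''.join(pieces)
-- ===== Notes on version B (the rewrite author's own statement) =====
-- stated objective: idiomatic
-- what changed: Replaces A's index-based scan with a nested identifier-run while-loop and per-character slicing by a groupby-style single pass that accumulates maximal runs of equal character class and renders each run once.
import Mathlib
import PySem

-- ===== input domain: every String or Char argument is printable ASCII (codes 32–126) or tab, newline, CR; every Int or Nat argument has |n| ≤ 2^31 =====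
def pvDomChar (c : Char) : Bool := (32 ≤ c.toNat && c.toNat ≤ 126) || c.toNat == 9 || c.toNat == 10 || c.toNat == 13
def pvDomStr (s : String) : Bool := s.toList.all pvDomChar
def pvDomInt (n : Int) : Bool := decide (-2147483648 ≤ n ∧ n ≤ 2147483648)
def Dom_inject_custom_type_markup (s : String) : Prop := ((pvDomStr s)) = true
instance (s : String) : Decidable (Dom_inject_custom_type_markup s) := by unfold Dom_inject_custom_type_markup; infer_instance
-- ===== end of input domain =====

-- B re-implements the token-wrapping as a groupby-style single pass over maximal
-- runs of same character class (no index arithmetic, no inner scan, no slicing);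
-- objective: idiomatic/alternative decomposition, same O(n) cost.

-- shared module constants of Source A / Source B
def pvIsIdent (c : Char) : Bool := c == '_' || PySem.Chars.isalnum c

def pvCustomTypes : PySem.Set (List Char) :=
  PySem.Set.ofList ["ll".toList, "ull".toList, "ld".toList, "i64".toList, "u64".toList,
                    "p64".toList, "pii".toList, "pll".toList, "v64".toList, "vll".toList]

def pvWrap (tok : List Char) : List Char := "@\\typ{".toList ++ tok ++ "}@".toList

-- ===== PORT A =====
-- inner while: `while j < n and is_ident_char(s[j]): j += 1`
def pvInnerA (cs : List Char) (n j : Nat) : Nat :=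
  if _h : j < n ∧ (((PySem.List.pyGet? cs (j : Int)).map pvIsIdent).getD false) = true then
    pvInnerA cs n (j + 1)
  else j
termination_by n - j
decreasing_by omega

-- termination facts for the outer while (cited in pvLoopA's decreasing_by)
theorem pvInnerA_ge_aux (cs : List Char) (n : Nat) :
    ∀ k j, n - j ≤ k → j ≤ pvInnerA cs n j := by
  intro k
  induction k with
  | zero =>
    intro j h
    rw [pvInnerA]
    split
    · omega
    · exact le_rfl
  | succ k ih =>
    intro j h
    rw [pvInnerA]
    split
    · rename_i hcond
      exact le_trans (Nat.le_succ j) (ih (j + 1) (by omega))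
    · exact le_rfl

theorem pvInnerA_gt (cs : List Char) (n i : Nat)
    (h1 : i < n) (h2 : (((PySem.List.pyGet? cs (i : Int)).map pvIsIdent).getD false) = true) :
    i < pvInnerA cs n i := by
  rw [pvInnerA]
  rw [dif_pos ⟨h1, h2⟩]
  exact Nat.lt_of_lt_of_le (Nat.lt_succ_self i) (pvInnerA_ge_aux cs n (n - (i + 1)) (i + 1) le_rfl)

-- outer while of A, accumulating `out`
def pvLoopA (cs : List Char) (n i : Nat) (out : List (List Char)) : List (List Char) :=
  if h : i < n then
    if hc : (((PySem.List.pyGet? cs (i : Int)).map pvIsIdent).getD false) = true then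
      let j := pvInnerA cs n i
      let tok := PySem.List.slice cs (some (i : Int)) (some (j : Int))
      pvLoopA cs n j
        (out ++ [if PySem.Set.contains pvCustomTypes tok then pvWrap tok else tok])
    else
      pvLoopA cs n (i + 1) (out ++ [(PySem.List.pyGet? cs (i : Int)).elim [] (fun c => [c])])
  else out
termination_by n - i
decreasing_by
  · have := pvInnerA_gt cs n i h hc; omega
  · omega

def inject_custom_type_markup (s : String) : String :=
  String.mk (PySem.Chars.join [] (pvLoopA s.toList s.toList.length 0 []))

-- ===== PORT B =====
-- Source B's _render(key, run)
def pvRenderB (key : Option Bool) (run : List Char) : List Char :=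
  if key == some true && PySem.Set.contains pvCustomTypes run then pvWrap run else run

-- Source B's loop body: state (key, run, pieces)
def pvStepB (st : Option Bool × List Char × List (List Char)) (c : Char) :
    Option Bool × List Char × List (List Char) :=
  match st with
  | (key, run, pieces) =>
    let k := pvIsIdent c
    if some k == key then (key, run ++ [c], pieces)
    else (some k, [c], if run.isEmpty then pieces else pieces ++ [pvRenderB key run])

def inject_custom_type_markup_alt (s : String) : String :=
  let st := s.toList.foldl pvStepB (none, [], [])
  String.mk (PySem.Chars.join []
    (if st.2.1.isEmpty then st.2.2 else st.2.2 ++ [pvRenderB st.1 st.2.1]))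

-- ===== PRECONDITION & SPEC =====
def Spec_inject_custom_type_markup (s : String) (out : String) : Prop := out = inject_custom_type_markup_alt s
instance (s : String) (out : String) : Decidable (Spec_inject_custom_type_markup s out) := by unfold Spec_inject_custom_type_markup; infer_instance

-- ===== CLAIM (what is proved, stated in full; the proofs are below) =====
def Claim_equal_inject_custom_type_markup : Prop := ∀ (s : String), Dom_inject_custom_type_markup s → Spec_inject_custom_type_markup s (inject_custom_type_markup s)

-- ===== LEMMAS AND PROOFS =====

-- the common specification: s split into maximal runs of equal pvIsIdent-class
def pvRuns : List Char → List (Bool × List Char)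
  | [] => []
  | c :: rest =>
    (pvIsIdent c, c :: rest.takeWhile (fun d => pvIsIdent d == pvIsIdent c)) ::
      pvRuns (rest.dropWhile (fun d => pvIsIdent d == pvIsIdent c))
termination_by cs => cs.length
decreasing_by
  simp only [List.length_cons, Nat.lt_succ_iff]
  exact List.length_dropWhile_le _ _

def pvRenderRun (k : Bool) (run : List Char) : List Char :=
  if k && PySem.Set.contains pvCustomTypes run then pvWrap run else run

def pvF (cs : List Char) : List Char :=
  ((pvRuns cs).map (fun kr => pvRenderRun kr.1 kr.2)).flatten

theorem pvF_cons (c : Char) (rest : List Char) :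
    pvF (c :: rest) =
      pvRenderRun (pvIsIdent c) (c :: rest.takeWhile (fun d => pvIsIdent d == pvIsIdent c)) ++
        pvF (rest.dropWhile (fun d => pvIsIdent d == pvIsIdent c)) := by
  rw [pvF, pvRuns]
  simp [pvF]

theorem pvJoinNil (xs : List (List Char)) : PySem.Chars.join [] xs = xs.flatten := by
  induction xs with
  | nil => rfl
  | cons a l ih =>
    cases l with
    | nil => simp [PySem.Chars.join_singleton]
    | cons b l' =>
      rw [PySem.Chars.join_cons_cons]
      simp only [List.flatten_cons]
      rw [ih]
      simp

theorem take_len_takeWhile (p : Char → Bool) (l : List Char) :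
    l.take (l.takeWhile p).length = l.takeWhile p := by
  induction l with
  | nil => rfl
  | cons a l ih =>
    by_cases h : p a <;> simp [List.takeWhile_cons, h, ih]

theorem drop_len_takeWhile (p : Char → Bool) (l : List Char) :
    l.drop (l.takeWhile p).length = l.dropWhile p := by
  induction l with
  | nil => rfl
  | cons a l ih =>
    by_cases h : p a <;> simp [List.takeWhile_cons, List.dropWhile_cons, h, ih]

-- the inner while computes the end of the maximal identifier run
theorem pvInnerA_eq_aux (cs : List Char) :
    ∀ k j, cs.length - j ≤ k →
      pvInnerA cs cs.length j = j + ((cs.drop j).takeWhile pvIsIdent).length := by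
  intro k
  induction k with
  | zero =>
    intro j h
    rw [pvInnerA]
    split
    · omega
    · have hj : cs.length ≤ j := by omega
      rw [List.drop_eq_nil_of_le hj]
      simp
  | succ k ih =>
    intro j h
    rw [pvInnerA]
    split
    · rename_i hcond
      obtain ⟨hj, hid⟩ := hcond
      have hget : PySem.List.pyGet? cs (j : Int) = some cs[j] := by
        simp [PySem.List.pyGet?_natCast, List.getElem?_eq_getElem hj]
      rw [hget] at hid
      simp only [Option.map_some, Option.getD_some] at hid
      rw [ih (j + 1) (by omega)]
      have hdrop : cs.drop j = cs[j] :: cs.drop (j + 1) := (List.getElem_cons_drop hj).symm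
      rw [hdrop, List.takeWhile_cons_of_pos hid]
      simp only [List.length_cons]
      omega
    · rename_i hcond
      by_cases hj : j < cs.length
      · have hget : PySem.List.pyGet? cs (j : Int) = some cs[j] := by
          simp [PySem.List.pyGet?_natCast, List.getElem?_eq_getElem hj]
        have hid : pvIsIdent cs[j] = false := by
          cases hb : pvIsIdent cs[j]
          · rfl
          · exact absurd ⟨hj, by simp [hget, hb]⟩ hcond
        have hdrop : cs.drop j = cs[j] :: cs.drop (j + 1) := (List.getElem_cons_drop hj).symm
        rw [hdrop, List.takeWhile_cons_of_neg (by simp [hid])]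
        simp
      · rw [List.drop_eq_nil_of_le (by omega)]
        simp

theorem pvInnerA_eq (cs : List Char) (j : Nat) :
    pvInnerA cs cs.length j = j + ((cs.drop j).takeWhile pvIsIdent).length :=
  pvInnerA_eq_aux cs (cs.length - j) j le_rfl

-- non-identifier characters: A emits them one by one, the runs view in one chunk;
-- flattened they agree
theorem pvF_cons_notIdent (c : Char) (rest : List Char) (h : pvIsIdent c = false) :
    pvF (c :: rest) = c :: pvF rest := by
  rw [pvF_cons]
  rw [h]
  have hrender : ∀ l : List Char, pvRenderRun false l = l := by
    intro l; simp [pvRenderRun]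
  rw [hrender]
  cases rest with
  | nil => simp [pvF, pvRuns]
  | cons d rest2 =>
    by_cases hd : pvIsIdent d = true
    · rw [List.takeWhile_cons_of_neg (by simp [hd]), List.dropWhile_cons_of_neg (by simp [hd])]
      simp
    · have hd' : pvIsIdent d = false := by simpa using hd
      rw [List.takeWhile_cons_of_pos (by simp [hd']), List.dropWhile_cons_of_pos (by simp [hd'])]
      rw [pvF_cons, hd', hrender]
      simp

-- A's outer loop, flattened, computes the rendered runs of the remaining suffix
theorem pvLoopA_flatten_aux (cs : List Char) :
    ∀ k i out, cs.length - i ≤ k → i ≤ cs.length →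
      (pvLoopA cs cs.length i out).flatten = out.flatten ++ pvF (cs.drop i) := by
  intro k
  induction k with
  | zero =>
    intro i out hk hi
    have : i = cs.length := by omega
    subst this
    rw [pvLoopA]
    simp [pvF, pvRuns]
  | succ k ih =>
    intro i out hk hi
    rw [pvLoopA]
    by_cases h : i < cs.length
    · rw [dif_pos h]
      have hget : PySem.List.pyGet? cs (i : Int) = some cs[i] := by
        simp [PySem.List.pyGet?_natCast, List.getElem?_eq_getElem h]
      have hdrop : cs.drop i = cs[i] :: cs.drop (i + 1) := (List.getElem_cons_drop h).symm
      by_cases hc : (((PySem.List.pyGet? cs (i : Int)).map pvIsIdent).getD false) = true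
      · rw [dif_pos hc]
        dsimp only
        have hid : pvIsIdent cs[i] = true := by
          rw [hget] at hc; simpa using hc
        -- the maximal identifier run starting at i
        set t := (cs.drop i).takeWhile pvIsIdent with ht
        have hj : pvInnerA cs cs.length i = i + t.length := pvInnerA_eq cs i
        have htlen : t.length ≤ (cs.drop i).length := by
          rw [ht]; exact (List.takeWhile_prefix _).length_le
        have hjlen : i + t.length ≤ cs.length := by
          rw [List.length_drop] at htlen; omega
        have ht1 : 1 ≤ t.length := by
          rw [ht, hdrop, List.takeWhile_cons_of_pos hid]
          simp
        have htok : PySem.List.slice cs (some (i : Int)) (some ((pvInnerA cs cs.length i : Nat) : Int)) = t := by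
          rw [hj]
          have : ((i + t.length : Nat) : Int) = (i : Int) + (t.length : Int) := by push_cast; ring
          rw [this, PySem.List.slice_natCast_add]
          rw [ht, take_len_takeWhile]
        have hrest : cs.drop (pvInnerA cs cs.length i) = (cs.drop i).dropWhile pvIsIdent := by
          rw [hj, ht, ← drop_len_takeWhile pvIsIdent (cs.drop i), List.drop_drop, Nat.add_comm]
        rw [htok]
        rw [ih (pvInnerA cs cs.length i) _ (by omega) (by omega)]
        rw [hrest]
        -- identify with the runs view of the suffix
        have ht' : t = cs[i] :: (cs.drop (i+1)).takeWhile (fun d => pvIsIdent d == pvIsIdent cs[i]) := by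
          rw [ht, hdrop, List.takeWhile_cons_of_pos hid]
          simp [hid]
        have hd' : (cs.drop i).dropWhile pvIsIdent
            = (cs.drop (i+1)).dropWhile (fun d => pvIsIdent d == pvIsIdent cs[i]) := by
          rw [hdrop, List.dropWhile_cons_of_pos hid]
          simp [hid]
        rw [hdrop, pvF_cons, ← ht', ← hd']
        have : (if PySem.Set.contains pvCustomTypes t then pvWrap t else t)
            = pvRenderRun (pvIsIdent cs[i]) t := by
          rw [hid, pvRenderRun]; simp
        rw [this]
        simp
      · rw [dif_neg hc]
        have hid : pvIsIdent cs[i] = false := by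
          cases hb : pvIsIdent cs[i]
          · rfl
          · exact absurd (by simp [hget, hb]) hc
        rw [ih (i + 1) _ (by omega) (by omega)]
        rw [hdrop, pvF_cons_notIdent _ _ hid, hget]
        simp
    · rw [dif_neg h]
      have : i = cs.length := by omega
      subst this
      simp [pvF, pvRuns]

theorem pvLoopA_flatten (cs : List Char) :
    (pvLoopA cs cs.length 0 []).flatten = pvF cs := by
  have := pvLoopA_flatten_aux cs cs.length 0 [] (by omega) (by omega)
  simpa using this

-- B's fold invariant: with a nonempty open run of class kb, the finished result is
-- pieces, then the completed run, then the runs of the remaining suffix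
def pvFinish (st : Option Bool × List Char × List (List Char)) : List (List Char) :=
  if st.2.1.isEmpty then st.2.2 else st.2.2 ++ [pvRenderB st.1 st.2.1]

theorem pvRenderB_some (kb : Bool) (run : List Char) :
    pvRenderB (some kb) run = pvRenderRun kb run := by
  simp [pvRenderB, pvRenderRun]

theorem pvFoldB_inv (cs : List Char) :
    ∀ (kb : Bool) (run : List Char) (pieces : List (List Char)), run ≠ [] →
      (pvFinish (cs.foldl pvStepB (some kb, run, pieces))).flatten
        = pieces.flatten
          ++ pvRenderRun kb (run ++ cs.takeWhile (fun d => pvIsIdent d == kb))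
          ++ pvF (cs.dropWhile (fun d => pvIsIdent d == kb)) := by
  induction cs with
  | nil =>
    intro kb run pieces hrun
    have hre : run.isEmpty = false := by
      cases run with
      | nil => exact absurd rfl hrun
      | cons a l => rfl
    simp only [List.foldl_nil, List.takeWhile_nil, List.dropWhile_nil, List.append_nil]
    simp [pvFinish, hre, pvRenderB_some, pvF, pvRuns]
  | cons c cs' ih =>
    intro kb run pieces hrun
    rw [List.foldl_cons]
    by_cases hk : pvIsIdent c = kb
    · have hstep : pvStepB (some kb, run, pieces) c = (some kb, run ++ [c], pieces) := by
        simp [pvStepB, hk]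
      rw [hstep, ih kb (run ++ [c]) pieces (by simp)]
      rw [List.takeWhile_cons_of_pos (by simp [hk]), List.dropWhile_cons_of_pos (by simp [hk])]
      simp
    · have hstep : pvStepB (some kb, run, pieces) c
          = (some (pvIsIdent c), [c], pieces ++ [pvRenderB (some kb) run]) := by
        simp [pvStepB]
        rw [if_neg hk, if_neg hrun]
      rw [hstep, ih (pvIsIdent c) [c] _ (by simp)]
      rw [List.takeWhile_cons_of_neg (by simp [hk]), List.dropWhile_cons_of_neg (by simp [hk])]
      rw [pvF_cons]
      rw [pvRenderB_some]
      simp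

-- ===== VERDICT (by name: the statement is the Claim_ definition above) =====
theorem inject_custom_type_markup_spec : Claim_equal_inject_custom_type_markup := by
  intro s _
  unfold Spec_inject_custom_type_markup
  have key : ∀ cs : List Char,
      (pvLoopA cs cs.length 0 []).flatten
        = (pvFinish (cs.foldl pvStepB (none, [], []))).flatten := by
    intro cs
    cases cs with
    | nil => simp [pvLoopA, pvFinish]
    | cons c rest =>
      rw [pvLoopA_flatten]
      have hstep : pvStepB (none, [], []) c = (some (pvIsIdent c), [c], []) := by
        simp [pvStepB]
      rw [List.foldl_cons, hstep]
      rw [pvFoldB_inv rest (pvIsIdent c) [c] [] (by simp)]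
      rw [pvF_cons]
      simp
  show String.mk (PySem.Chars.join [] (pvLoopA s.toList s.toList.length 0 []))
      = String.mk (PySem.Chars.join [] (pvFinish (s.toList.foldl pvStepB (none, [], []))))
  rw [pvJoinNil, pvJoinNil, key s.toList]
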